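-- pv_equiv track=rewrite | github.com/ezmsg-org/ezmsg | src/ezmsg/core/graph_util.py | _pipeline_levels
-- ===== SOURCE A (Python) =====
-- from collections import defaultdict
-- from typing import Set, DefaultDict, Optional, Tuple, List
--
-- GraphType = DefaultDict[str, Set[str]]
--
-- def _pipeline_levels(
--     graph_connections: GraphType, level_separator: str = "/"
-- ) -> defaultdict:
--     """
--     In ezmsg, a pipeline is built with units/collections, with subcomponents
--     that are either more units/collection or input/output streams. The graph of
--     the connections are stored in a DAG (directed acyclic graph object), but the
--     nodes themselves represent the hierarchical levels of the pipeline in their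
--     names which are strings of the form `top_level/sub_level/.../node_name`, where
--     each level is separated by a level separator (default is `/`).
--     This function computes the level of each component in the hierarchy (not just
--     the connection nodes) and returns a dictionary of the level of each pipeline
--     parts, where 0 is the level of the connection (leaf) nodes.
--     """
--     graph_levels = defaultdict(int)
--
--     def update_level(node: str) -> None:
--         """
--         Update levels of a leaf node and all pipeline parent nodes.
--         Note, assumes node is a leaf node of the forest.
--         """
--         depth = 0
--         while len(node) > 0:
--             graph_levels[node] = max(graph_levels[node], depth)
--             node = _get_parent_node(node, level_separator)
--             depth += 1
--
--     for node, conns in graph_connections.items():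
--         update_level(node)
--         for conn in conns:
--             update_level(conn)
--
--     return graph_levels
--
-- def _get_parent_node(node: str, level_separator: str = "/") -> str:
--     return node.rsplit(level_separator, 1)[0] if level_separator in node else ""
-- ===== SOURCE B (Python) =====
-- from collections import defaultdict
--
--
-- def _get_parent_node(node: str, level_separator: str = "/") -> str:
--     return node.rsplit(level_separator, 1)[0] if level_separator in node else ""
--
--
-- def _pipeline_levels(graph_connections, level_separator: str = "/"):
--     # Phase 1: register every node and all of its ancestor prefixes with level 0.
--     levels = {}
--
--     def register(node: str) -> None:
--         while node:
--             levels.setdefault(node, 0)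
--             node = _get_parent_node(node, level_separator)
--
--     for node, conns in graph_connections.items():
--         register(node)
--         for conn in conns:
--             register(conn)
--
--     # Phase 2: one bottom-up relaxation pass, deepest (longest) names first.
--     for node in sorted(levels, key=len, reverse=True):
--         parent = _get_parent_node(node, level_separator)
--         if parent:
--             levels[parent] = max(levels.get(parent, 0), levels[node] + 1)
--
--     result = defaultdict(int)
--     result.update(levels)
--     return result
-- ===== Notes on version B (the rewrite author's own statement) =====
-- stated objective: alternative
-- what changed: Instead of re-walking every leaf's ancestor chain while maxing an explicit depth counter, B first registers all nodes and ancestor prefixes at level 0 and then computes levels in a single bottom-up relaxation pass (longest names first, parent = max(parent, child+1)).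
import Mathlib
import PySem

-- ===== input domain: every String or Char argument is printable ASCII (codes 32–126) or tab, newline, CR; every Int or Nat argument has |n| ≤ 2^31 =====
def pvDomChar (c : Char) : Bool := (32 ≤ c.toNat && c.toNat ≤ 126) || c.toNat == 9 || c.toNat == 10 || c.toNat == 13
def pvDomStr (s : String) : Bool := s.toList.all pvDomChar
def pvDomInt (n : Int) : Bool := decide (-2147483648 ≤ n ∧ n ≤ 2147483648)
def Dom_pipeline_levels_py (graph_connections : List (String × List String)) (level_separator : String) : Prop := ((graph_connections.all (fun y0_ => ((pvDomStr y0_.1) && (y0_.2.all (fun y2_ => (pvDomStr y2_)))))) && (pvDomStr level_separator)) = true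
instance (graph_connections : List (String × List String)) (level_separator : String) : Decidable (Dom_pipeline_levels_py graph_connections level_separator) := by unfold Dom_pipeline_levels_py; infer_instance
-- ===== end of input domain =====

-- B replaces A's per-leaf depth-counting chain walks by (1) registering every node and
-- ancestor prefix at level 0 and (2) one bottom-up relaxation pass over the nodes sorted by
-- decreasing name length, setting parent = max(parent, child + 1): objective 'alternative'.


-- ===== PORT A =====
-- helper for s.rsplit(sep, 1)[0] (used by both Pythons' _get_parent_node): the prefix of s
-- before the LAST occurrence of sep; none ↔ sep does not occur in s.  Hand-ported (PySem has
-- no rsplit); exact for sep ≠ "" — for sep = "" Python's rsplit raises ValueError (outside Pre_).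
def pvLastSplit (s sep : List Char) : Option (List Char) :=
  match s with
  | [] => none
  | c :: rest =>
    match pvLastSplit rest sep with
    | some p => some (c :: p)
    | none => if sep.isPrefixOf (c :: rest) then some [] else none

-- termination helper for the chain walks below (cited by their decreasing_by)
theorem pvLastSplit_length {s sep p : List Char} (h : pvLastSplit s sep = some p) :
    p.length < s.length := by
  induction s generalizing p with
  | nil => simp [pvLastSplit] at h
  | cons c rest ih =>
    cases hr : pvLastSplit rest sep with
    | some q =>
      simp only [pvLastSplit, hr] at h
      cases h
      exact Nat.succ_lt_succ (ih hr)
    | none =>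
      simp only [pvLastSplit, hr] at h
      by_cases hp : sep.isPrefixOf (c :: rest) = true
      · simp only [hp, if_true] at h
        cases h
        exact Nat.succ_pos _
      · simp [hp] at h

-- _get_parent_node(node, sep) = node.rsplit(sep, 1)[0] if sep in node else ""
-- (the sep = "" test is only a totality guard: Python raises ValueError there, outside Pre_)
def pvParent (node level_separator : String) : String :=
  if level_separator.toList = [] then ""
  else
    match pvLastSplit node.toList level_separator.toList with
    | some p => String.ofList p
    | none => ""

theorem pvParent_length (node level_separator : String) (h : node.toList ≠ []) :
    (pvParent node level_separator).toList.length < node.toList.length := by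
  unfold pvParent
  split
  · simpa using List.length_pos_iff.mpr h
  · split
    next p hls =>
      rw [String.toList_ofList]
      exact pvLastSplit_length hls
    next hls => simpa using List.length_pos_iff.mpr h

-- update_level: while len(node) > 0: graph_levels[node] = max(graph_levels[node], depth);
--               node = _get_parent_node(node, sep); depth += 1
def pvUpdateLevel (d : PySem.Dict String Int) (node : String) (depth : Int)
    (level_separator : String) : PySem.Dict String Int :=
  if _h : node.toList = [] then d
  else
    pvUpdateLevel (d.insert node (max (d.getD node 0) depth))
      (pvParent node level_separator) (depth + 1) level_separator
termination_by node.toList.length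
decreasing_by exact pvParent_length node level_separator _h

def pipeline_levels_py (graph_connections : List (String × List String))
    (level_separator : String) : List (String × Int) :=
  (graph_connections.foldl
    (fun d kv => kv.2.foldl (fun d conn => pvUpdateLevel d conn 0 level_separator)
      (pvUpdateLevel d kv.1 0 level_separator))
    PySem.Dict.empty).items

-- ===== PORT B =====
-- phase 1 helper: while node: levels.setdefault(node, 0); node = _get_parent_node(node, sep)
def pvRegister (d : PySem.Dict String Int) (node level_separator : String) :
    PySem.Dict String Int :=
  if _h : node.toList = [] then d
  else pvRegister (d.setdefault node 0) (pvParent node level_separator) level_separator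
termination_by node.toList.length
decreasing_by exact pvParent_length node level_separator _h

def pipeline_levels_py_alt (graph_connections : List (String × List String))
    (level_separator : String) : List (String × Int) :=
  -- phase 1: register every node and all its ancestor prefixes at level 0
  let d0 := graph_connections.foldl
    (fun d kv => kv.2.foldl (fun d conn => pvRegister d conn level_separator)
      (pvRegister d kv.1 level_separator))
    PySem.Dict.empty
  -- phase 2: one relaxation pass, longest names first:
  --   parent = _get_parent_node(node); if parent: levels[parent] = max(levels.get(parent, 0), levels[node] + 1)
  let d1 := (PySem.List.sorted d0.keys (fun n => PySem.Str.len n) true).foldl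
    (fun d node =>
      let parent := pvParent node level_separator
      if parent.toList = [] then d
      else d.insert parent (max (d.getD parent 0) (d.getD node 0 + 1)))
    d0
  -- result = defaultdict(int); result.update(levels): same items in the same order
  d1.items

-- ===== PRECONDITION & SPEC =====
-- Pre_ excludes exactly the inputs where Python A raises: level_separator = "" makes
-- node.rsplit("", 1) raise ValueError as soon as any nonempty node (key or connection) is walked.
def Pre_pipeline_levels_py (graph_connections : List (String × List String))
    (level_separator : String) : Prop :=
  level_separator ≠ "" ∨ ∀ p ∈ graph_connections, p.1 = "" ∧ ∀ c ∈ p.2, c = ""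
instance (graph_connections : List (String × List String)) (level_separator : String) : Decidable (Pre_pipeline_levels_py graph_connections level_separator) := by unfold Pre_pipeline_levels_py; infer_instance

def pvWitness_pipeline_levels_py : (List (String × List String)) × String :=
  ([("a/b", ["c", "a/b/c/d"])], "/")

def Spec_pipeline_levels_py (graph_connections : List (String × List String)) (level_separator : String) (out : List (String × Int)) : Prop := out = pipeline_levels_py_alt graph_connections level_separator
instance (graph_connections : List (String × List String)) (level_separator : String) (out : List (String × Int)) : Decidable (Spec_pipeline_levels_py graph_connections level_separator out) := by unfold Spec_pipeline_levels_py; infer_instance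

-- ===== CLAIM (what is proved, stated in full; the proofs are below) =====
def Claim_equal_pipeline_levels_py : Prop := ∀ (graph_connections : List (String × List String)) (level_separator : String), Dom_pipeline_levels_py graph_connections level_separator → Pre_pipeline_levels_py graph_connections level_separator → Spec_pipeline_levels_py graph_connections level_separator (pipeline_levels_py graph_connections level_separator)

-- ===== LEMMAS AND PROOFS =====

-- the ancestor chain of a node: [node, parent, grandparent, …] down to (excluding) ""
def pvChain (level_separator node : String) : List String :=
  if _h : node.toList = [] then []
  else node :: pvChain level_separator (pvParent node level_separator)
termination_by node.toList.length
decreasing_by exact pvParent_length node level_separator _h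

-- the sequence of leaves A walks: for each item, the key then its connections
def pvLeaves (g : List (String × List String)) : List String :=
  g.flatMap (fun kv => kv.1 :: kv.2)

-- all (depth, node) update operations A performs, in order
def pvOps (g : List (String × List String)) (sep : String) : List (Int × String) :=
  (pvLeaves g).flatMap (fun l => PySem.List.enumerate (pvChain sep l) 0)

def pvBump (d : PySem.Dict String Int) (p : Int × String) : PySem.Dict String Int :=
  d.insert p.2 (max (d.getD p.2 0) p.1)

def pvOccs (ops : List (Int × String)) (n : String) : List Int :=
  ops.filterMap (fun p => if p.2 = n then some p.1 else none)

-- the level A assigns to n: the maximal depth at which n is ever updated (0 if never)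
def pvMax (ops : List (Int × String)) (n : String) : Int :=
  (pvOccs ops n).foldl max 0

-- the common key list, in first-touch order
def pvK (g : List (String × List String)) (sep : String) : List String :=
  PySem.List.dedup ((pvOps g sep).map (fun p => p.2))

-- value of n in B's dict after the relaxation pass has processed the nodes in `pre`
def pvVal (g : List (String × List String)) (sep : String) (pre : List String) (n : String) : Int :=
  (pre.filter (fun c => pvParent c sep = n)).foldl
    (fun a c => max a (pvMax (pvOps g sep) c + 1)) 0

theorem pvUpdateLevel_eq (d : PySem.Dict String Int) (node : String) (depth : Int)
    (sep : String) :
    pvUpdateLevel d node depth sep =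
      (PySem.List.enumerate (pvChain sep node) depth).foldl pvBump d := by
  fun_induction pvUpdateLevel d node depth sep with
  | case1 d node depth h =>
    rw [pvChain, dif_pos h, PySem.List.enumerate_nil, List.foldl_nil]
  | case2 d node depth h ih =>
    rw [pvChain, dif_neg h, PySem.List.enumerate_cons, List.foldl_cons]
    exact ih

theorem pvRegister_eq (d : PySem.Dict String Int) (node sep : String) :
    pvRegister d node sep = (pvChain sep node).foldl (fun d m => d.setdefault m 0) d := by
  fun_induction pvRegister d node sep with
  | case1 d node h => rw [pvChain, dif_pos h, List.foldl_nil]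
  | case2 d node h ih => rw [pvChain, dif_neg h, List.foldl_cons]; exact ih

theorem pvFoldl_leaves {β : Type} (g : List (String × List String)) (f : β → String → β) (d : β) :
    g.foldl (fun d kv => kv.2.foldl f (f d kv.1)) d = (pvLeaves g).foldl f d := by
  induction g generalizing d with
  | nil => rfl
  | cons kv g ih =>
    simp only [pvLeaves, List.flatMap_cons, List.foldl_append, List.foldl_cons]
    simpa [pvLeaves] using ih (kv.2.foldl f (f d kv.1))

theorem pvFoldl_flatMap {α β γ : Type} (ls : List α) (h : α → List β) (f : γ → β → γ) (d : γ) :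
    ls.foldl (fun d l => (h l).foldl f d) d = (ls.flatMap h).foldl f d := by
  induction ls generalizing d with
  | nil => rfl
  | cons l ls ih => rw [List.foldl_cons, ih, List.flatMap_cons, List.foldl_append]

theorem pvDedup_append (xs : List String) (x : String) :
    PySem.List.dedup (xs ++ [x]) =
      if x ∈ xs then PySem.List.dedup xs else PySem.List.dedup xs ++ [x] := by
  rw [PySem.List.dedup_eq_ofList, PySem.List.dedup_eq_ofList,
    PySem.Set.ofList_eq_foldl (xs ++ [x]), List.foldl_append,
    List.foldl_cons, List.foldl_nil, ← PySem.Set.ofList_eq_foldl]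
  show PySem.Set.add _ x = _
  unfold PySem.Set.add
  by_cases hx : x ∈ xs
  · rw [if_pos ((PySem.Set.contains_iff _ _).mpr ((PySem.Set.mem_ofList _ _).mpr hx)), if_pos hx]
  · rw [if_neg (by simpa [PySem.Set.contains_iff, PySem.Set.mem_ofList] using hx), if_neg hx]

theorem pvGetD_mkmap (K : List String) (F : String → Int) (x : String)
    (hK : K.Nodup) (hx : x ∈ K) :
    (PySem.Dict.mk (K.map (fun n => (n, F n)))).getD x 0 = F x := by
  have h1 : ((PySem.Dict.mk (K.map (fun n => (n, F n)))).keys).Nodup := by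
    rw [PySem.Dict.keys_mk]
    simpa [List.map_map, Function.comp_def] using hK
  have h2 : (x, F x) ∈ (PySem.Dict.mk (K.map (fun n => (n, F n)))).items :=
    List.mem_map.mpr ⟨x, hx, rfl⟩
  rw [PySem.Dict.getD_eq_get?_getD, PySem.Dict.get?_of_mem_items _ h2 h1]
  rfl

theorem pvContains_mkmap (K : List String) (F : String → Int) (x : String) :
    (PySem.Dict.mk (K.map (fun n => (n, F n)))).contains x = true ↔ x ∈ K := by
  rw [PySem.Dict.contains_mk]
  simp [List.any_eq_true]

theorem pvOccs_append (ops : List (Int × String)) (i : Int) (x n : String) :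
    pvOccs (ops ++ [(i, x)]) n = pvOccs ops n ++ (if x = n then [i] else []) := by
  unfold pvOccs
  rw [List.filterMap_append]
  by_cases h : x = n <;> simp [h]

theorem pvMax_append (ops : List (Int × String)) (i : Int) (x n : String) :
    pvMax (ops ++ [(i, x)]) n = if x = n then max (pvMax ops n) i else pvMax ops n := by
  unfold pvMax
  rw [pvOccs_append]
  by_cases h : x = n <;> simp [h, List.foldl_append]

theorem pvMax_of_not_mem (ops : List (Int × String)) (n : String)
    (h : n ∉ ops.map (fun p => p.2)) : pvMax ops n = 0 := by
  have : pvOccs ops n = [] := by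
    rw [pvOccs, List.filterMap_eq_nil_iff]
    intro p hp
    have : p.2 ≠ n := fun he => h (List.mem_map.mpr ⟨p, hp, he⟩)
    simp [this]
  rw [pvMax, this, List.foldl_nil]

theorem pvBumpFold (ops : List (Int × String)) :
    ops.foldl pvBump PySem.Dict.empty =
      PySem.Dict.mk ((PySem.List.dedup (ops.map (fun p => p.2))).map
        (fun n => (n, pvMax ops n))) := by
  induction ops using List.reverseRecOn with
  | nil => rfl
  | append_singleton ops q ih =>
    obtain ⟨i, x⟩ := q
    rw [List.foldl_append, List.foldl_cons, List.foldl_nil, ih]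
    show PySem.Dict.insert _ x (max (PySem.Dict.getD _ x 0) i) = _
    by_cases hx : x ∈ ops.map (fun p => p.2)
    · have hdx : x ∈ PySem.List.dedup (ops.map (fun p => p.2)) :=
        (PySem.List.mem_dedup _ _).mpr hx
      have hget : (PySem.Dict.mk ((PySem.List.dedup (ops.map (fun p => p.2))).map
          (fun n => (n, pvMax ops n)))).getD x 0 = pvMax ops x :=
        pvGetD_mkmap _ _ _ (PySem.List.nodup_dedup _) hdx
      have hcon := (pvContains_mkmap (PySem.List.dedup (ops.map (fun p => p.2)))
        (fun n => pvMax ops n) x).mpr hdx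
      apply PySem.Dict.ext
      rw [PySem.Dict.items_insert_of_contains _ _ hcon, hget]
      show List.map _ (List.map _ _) = _
      rw [List.map_map]
      have hkeys : (ops ++ [(i, x)]).map (fun p => p.2) = ops.map (fun p => p.2) ++ [x] := by
        simp
      rw [hkeys, pvDedup_append, if_pos hx]
      apply List.map_congr_left
      intro n hn
      by_cases hnx : n = x
      · subst hnx
        simp only [Function.comp_apply, beq_self_eq_true, if_true, pvMax_append]
      · have hb : (n == x) = false := by simpa using hnx
        simp only [Function.comp_apply, hb, Bool.false_eq_true, if_false, pvMax_append,
          if_neg (fun h : x = n => hnx h.symm)]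
    · have hdx : x ∉ PySem.List.dedup (ops.map (fun p => p.2)) :=
        fun h => hx ((PySem.List.mem_dedup _ _).mp h)
      have hcon : (PySem.Dict.mk ((PySem.List.dedup (ops.map (fun p => p.2))).map
          (fun n => (n, pvMax ops n)))).contains x = false := by
        cases hc : (PySem.Dict.mk ((PySem.List.dedup (ops.map (fun p => p.2))).map
            (fun n => (n, pvMax ops n)))).contains x
        · rfl
        · exact absurd ((pvContains_mkmap _ _ _).mp hc) hdx
      apply PySem.Dict.ext
      rw [PySem.Dict.items_insert_of_not_contains _ _ hcon,
        PySem.Dict.getD_of_not_contains _ _ hcon]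
      have hkeys : (ops ++ [(i, x)]).map (fun p => p.2) = ops.map (fun p => p.2) ++ [x] := by
        simp
      rw [hkeys, pvDedup_append, if_neg hx]
      show _ ++ [(x, max 0 i)] = List.map _ (_ ++ [x])
      rw [List.map_append]
      congr 1
      · apply List.map_congr_left
        intro n hn
        have hnx : n ≠ x := fun he => hx (he ▸ (PySem.List.mem_dedup _ _).mp hn)
        rw [pvMax_append, if_neg (fun h : x = n => hnx h.symm)]
      · simp [pvMax_append, pvMax_of_not_mem ops x hx]

theorem pvRegFold (xs : List String) :
    xs.foldl (fun d m => d.setdefault m 0) PySem.Dict.empty =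
      PySem.Dict.mk ((PySem.List.dedup xs).map (fun n => (n, (0 : Int)))) := by
  induction xs using List.reverseRecOn with
  | nil => rfl
  | append_singleton xs x ih =>
    rw [List.foldl_append, List.foldl_cons, List.foldl_nil, ih, pvDedup_append]
    by_cases hx : x ∈ xs
    · rw [if_pos hx]
      exact PySem.Dict.setdefault_of_contains _ _
        ((pvContains_mkmap _ _ _).mpr ((PySem.List.mem_dedup _ _).mpr hx))
    · rw [if_neg hx]
      have hdx : x ∉ PySem.List.dedup xs := fun h => hx ((PySem.List.mem_dedup _ _).mp h)
      have hcon : (PySem.Dict.mk ((PySem.List.dedup xs).map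
          (fun n => (n, (0 : Int))))).contains x = false := by
        cases hc : (PySem.Dict.mk ((PySem.List.dedup xs).map
            (fun n => (n, (0 : Int))))).contains x
        · rfl
        · exact absurd ((pvContains_mkmap _ _ _).mp hc) hdx
      rw [PySem.Dict.setdefault_of_not_contains _ _ hcon]
      apply PySem.Dict.ext
      rw [PySem.Dict.items_insert_of_not_contains _ _ hcon]
      simp

theorem pvOps_map_snd (g : List (String × List String)) (sep : String) :
    (pvOps g sep).map (fun p => p.2) = (pvLeaves g).flatMap (pvChain sep) := by
  simp only [pvOps, List.map_flatMap, PySem.List.map_snd_enumerate]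

theorem pvMem_chain_ne (sep n m : String) (h : m ∈ pvChain sep n) : m.toList ≠ [] := by
  revert h
  fun_induction pvChain sep n with
  | case1 node hn => intro h; simp at h
  | case2 node hn ih =>
    intro h
    rcases List.mem_cons.mp h with h | h
    · exact h ▸ hn
    · exact ih h

theorem pvChain_getElem_succ (sep n : String) :
    ∀ (k : Nat) (c : String), (pvChain sep n)[k]? = some c →
      (pvChain sep n)[k + 1]? =
        (if (pvParent c sep).toList = [] then none else some (pvParent c sep)) := by
  fun_induction pvChain sep n with
  | case1 node hn => intro k c h; simp at h
  | case2 node hn ih =>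
    intro k c h
    match k with
    | 0 =>
      simp only [List.getElem?_cons_zero, Option.some.injEq] at h
      subst h
      show (pvChain sep (pvParent node sep))[0]? = _
      rw [pvChain]
      by_cases hp : (pvParent node sep).toList = []
      · rw [dif_pos hp, if_pos hp]; rfl
      · rw [dif_neg hp, if_neg hp]; rfl
    | k + 1 =>
      simp only [List.getElem?_cons_succ] at h ⊢
      exact ih k c h

theorem pvOps_up {g : List (String × List String)} {sep : String} {i : Int} {c : String}
    (h : (i, c) ∈ pvOps g sep) (hp : (pvParent c sep).toList ≠ []) :
    (i + 1, pvParent c sep) ∈ pvOps g sep := by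
  rcases List.mem_flatMap.mp h with ⟨l, hl, he⟩
  rcases (PySem.List.mem_enumerate_iff _ _ _).mp he with ⟨k, hk, hkv⟩
  have hik : i = (k : Int) ∧ c = (pvChain sep l)[k] := by
    constructor
    · have := congrArg Prod.fst hkv; simpa using this
    · have := congrArg Prod.snd hkv; simpa using this
  obtain ⟨hi, hc⟩ := hik
  have hget : (pvChain sep l)[k]? = some c := by
    rw [List.getElem?_eq_getElem hk, hc]
  have hsucc := pvChain_getElem_succ sep l k c hget
  rw [if_neg hp] at hsucc
  rcases List.getElem?_eq_some_iff.mp hsucc with ⟨hk1, hv1⟩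
  refine List.mem_flatMap.mpr ⟨l, hl, (PySem.List.mem_enumerate_iff _ _ _).mpr ⟨k + 1, hk1, ?_⟩⟩
  rw [← hv1, hi]
  push_cast
  ring_nf

theorem pvOps_down {g : List (String × List String)} {sep : String} {i : Int} {n : String}
    (h : (i, n) ∈ pvOps g sep) (hi : 0 < i) :
    ∃ c, pvParent c sep = n ∧ (i - 1, c) ∈ pvOps g sep := by
  rcases List.mem_flatMap.mp h with ⟨l, hl, he⟩
  rcases (PySem.List.mem_enumerate_iff _ _ _).mp he with ⟨k, hk, hkv⟩
  have hi : i = (k : Int) := by have := congrArg Prod.fst hkv; simpa using this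
  have hn : n = (pvChain sep l)[k] := by have := congrArg Prod.snd hkv; simpa using this
  match k, hk with
  | 0, _ => omega
  | k' + 1, hk =>
    have hk' : k' < (pvChain sep l).length := Nat.lt_of_succ_lt hk
    set c := (pvChain sep l)[k'] with hc
    have hget : (pvChain sep l)[k']? = some c := List.getElem?_eq_getElem hk'
    have hsucc := pvChain_getElem_succ sep l k' c hget
    have hkn : (pvChain sep l)[k' + 1]? = some n := by
      rw [List.getElem?_eq_getElem hk, hn]
    rw [hkn] at hsucc
    by_cases hp : (pvParent c sep).toList = []
    · rw [if_pos hp] at hsucc; cases hsucc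
    · rw [if_neg hp] at hsucc
      refine ⟨c, by injection hsucc.symm, ?_⟩
      refine List.mem_flatMap.mpr ⟨l, hl, (PySem.List.mem_enumerate_iff _ _ _).mpr ⟨k', hk', ?_⟩⟩
      rw [hi, hc]
      simp only [Prod.mk.injEq]
      refine ⟨by push_cast; ring, trivial⟩

theorem pvOps_nonneg {g : List (String × List String)} {sep : String} {i : Int} {n : String}
    (h : (i, n) ∈ pvOps g sep) : 0 ≤ i := by
  rcases List.mem_flatMap.mp h with ⟨l, _, he⟩
  rcases (PySem.List.mem_enumerate_iff _ _ _).mp he with ⟨k, _, hkv⟩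
  have : i = (k : Int) := by have := congrArg Prod.fst hkv; simpa using this
  omega

theorem pvMem_K_iff {g : List (String × List String)} {sep : String} {n : String} :
    n ∈ pvK g sep ↔ ∃ i, (i, n) ∈ pvOps g sep := by
  rw [pvK, PySem.List.mem_dedup, List.mem_map]
  constructor
  · rintro ⟨⟨i, m⟩, hm, rfl⟩
    exact ⟨i, hm⟩
  · rintro ⟨i, hi⟩
    exact ⟨(i, n), hi, rfl⟩

theorem pvK_ne_empty {g : List (String × List String)} {sep : String} {n : String}
    (h : n ∈ pvK g sep) : n.toList ≠ [] := by
  rcases pvMem_K_iff.mp h with ⟨i, hi⟩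
  rcases List.mem_flatMap.mp hi with ⟨l, _, he⟩
  rcases (PySem.List.mem_enumerate_iff _ _ _).mp he with ⟨k, hk, hkv⟩
  have hn : n = (pvChain sep l)[k] := by have := congrArg Prod.snd hkv; simpa using this
  exact pvMem_chain_ne sep l n (hn ▸ List.getElem_mem hk)

theorem pvMax_nonneg (ops : List (Int × String)) (n : String) : 0 ≤ pvMax ops n :=
  (PySem.List.le_foldl_max (pvOccs ops n) 0).1

theorem pvOcc_le_max {ops : List (Int × String)} {i : Int} {n : String}
    (h : (i, n) ∈ ops) : i ≤ pvMax ops n := by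
  have hi : i ∈ pvOccs ops n := List.mem_filterMap.mpr ⟨(i, n), h, by simp⟩
  exact (PySem.List.le_foldl_max (pvOccs ops n) 0).2 i hi

theorem pvMax_attained {g : List (String × List String)} {sep : String} {n : String}
    (h : n ∈ pvK g sep) : (pvMax (pvOps g sep) n, n) ∈ pvOps g sep := by
  rcases PySem.List.foldl_max_mem (pvOccs (pvOps g sep) n) 0 with h0 | hm
  · rcases pvMem_K_iff.mp h with ⟨i, hi⟩
    have h1 : 0 ≤ i := pvOps_nonneg hi
    have h2 : i ≤ pvMax (pvOps g sep) n := pvOcc_le_max hi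
    have h3 : pvMax (pvOps g sep) n = 0 := h0
    rw [show pvMax (pvOps g sep) n = i by omega]
    exact hi
  · rcases List.mem_filterMap.mp hm with ⟨⟨j, m⟩, hjm, hf⟩
    by_cases hmn : m = n
    · subst hmn
      rw [if_pos rfl] at hf
      have h4 : j = pvMax (pvOps g sep) m := by injection hf
      rw [← h4]
      exact hjm
    · simp [hmn] at hf

theorem pvFoldl_max_le {α : Type} (xs : List α) (f : α → Int) (a b : Int)
    (ha : a ≤ b) (hf : ∀ x ∈ xs, f x ≤ b) :
    xs.foldl (fun acc x => max acc (f x)) a ≤ b := by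
  rw [show xs.foldl (fun acc x => max acc (f x)) a = (xs.map f).foldl max a from
    (List.foldl_map).symm]
  rcases PySem.List.foldl_max_mem (xs.map f) a with h | h
  · rw [h]; exact ha
  · rcases List.mem_map.mp h with ⟨x, hx, hfx⟩
    exact hfx ▸ hf x hx

theorem pvClosure {g : List (String × List String)} {sep : String} {n : String}
    (h : n ∈ pvK g sep) (hp : (pvParent n sep).toList ≠ []) : pvParent n sep ∈ pvK g sep := by
  rcases pvMem_K_iff.mp h with ⟨i, hi⟩
  exact pvMem_K_iff.mpr ⟨i + 1, pvOps_up hi hp⟩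

theorem pvRecurrence {g : List (String × List String)} {sep : String} {n : String}
    (h : n ∈ pvK g sep) :
    pvMax (pvOps g sep) n =
      ((pvK g sep).filter (fun c => pvParent c sep = n)).foldl
        (fun a c => max a (pvMax (pvOps g sep) c + 1)) 0 := by
  apply le_antisymm
  · have hM := pvMax_attained h
    by_cases hz : pvMax (pvOps g sep) n ≤ 0
    · have h0 : pvMax (pvOps g sep) n = 0 := le_antisymm hz (pvMax_nonneg _ _)
      rw [h0]
      exact (PySem.List.le_foldl_max_int _ (fun c => pvMax (pvOps g sep) c + 1) 0).1
    · rcases pvOps_down hM (by omega) with ⟨c, hpc, hc'⟩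
      have hcK : c ∈ pvK g sep := pvMem_K_iff.mpr ⟨_, hc'⟩
      have h1 : pvMax (pvOps g sep) n - 1 ≤ pvMax (pvOps g sep) c := pvOcc_le_max hc'
      have hcf : c ∈ (pvK g sep).filter (fun c => pvParent c sep = n) :=
        List.mem_filter.mpr ⟨hcK, by simp [hpc]⟩
      have h2 := (PySem.List.le_foldl_max_int ((pvK g sep).filter (fun c => pvParent c sep = n))
        (fun c => pvMax (pvOps g sep) c + 1) 0).2 c hcf
      omega
  · apply pvFoldl_max_le
    · exact pvMax_nonneg _ _
    · intro c hc
      rcases List.mem_filter.mp hc with ⟨hcK, hpc⟩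
      have hpc : pvParent c sep = n := by simpa using hpc
      have hM := pvMax_attained hcK
      have hp : (pvParent c sep).toList ≠ [] := by rw [hpc]; exact pvK_ne_empty h
      have := pvOps_up hM hp
      rw [hpc] at this
      exact pvOcc_le_max this

theorem pvParent_len_lt {sep c : String} (h : c.toList ≠ []) :
    PySem.Str.len (pvParent c sep) < PySem.Str.len c := by
  rw [PySem.Str.len_eq, PySem.Str.len_eq]
  exact_mod_cast pvParent_length c sep h

theorem pvRelax_eq (g : List (String × List String)) (sep : String) :
    ∀ (suf pre : List String),
      PySem.List.sorted (pvK g sep) (fun n => PySem.Str.len n) true = pre ++ suf →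
      suf.foldl
        (fun d node =>
          let parent := pvParent node sep
          if parent.toList = [] then d
          else d.insert parent (max (d.getD parent 0) (d.getD node 0 + 1)))
        (PySem.Dict.mk ((pvK g sep).map (fun n => (n, pvVal g sep pre n)))) =
      PySem.Dict.mk ((pvK g sep).map (fun n =>
        (n, pvVal g sep (PySem.List.sorted (pvK g sep) (fun n => PySem.Str.len n) true) n))) := by
  intro suf
  induction suf with
  | nil =>
    intro pre hps
    rw [List.append_nil] at hps
    rw [List.foldl_nil, hps]
  | cons x suf ih =>
    intro pre hps
    set S := PySem.List.sorted (pvK g sep) (fun n => PySem.Str.len n) true with hS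
    have hSperm : S.Perm (pvK g sep) := PySem.List.sorted_perm _ _ _
    have hKnd : (pvK g sep).Nodup := PySem.List.nodup_dedup _
    have hSnd : S.Nodup := hSperm.nodup_iff.mpr hKnd
    have hxS : x ∈ S := by rw [hps]; exact List.mem_append_right _ (List.mem_cons_self ..)
    have hxK : x ∈ pvK g sep := hSperm.subset hxS
    have hxne : x.toList ≠ [] := pvK_ne_empty hxK
    rw [List.foldl_cons]
    have hstep :
        (fun d node =>
          let parent := pvParent node sep
          if parent.toList = [] then d
          else d.insert parent (max (d.getD parent 0) (d.getD node 0 + 1)))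
          (PySem.Dict.mk ((pvK g sep).map (fun n => (n, pvVal g sep pre n)))) x =
        PySem.Dict.mk ((pvK g sep).map (fun n => (n, pvVal g sep (pre ++ [x]) n))) := by
      show (if (pvParent x sep).toList = [] then _ else _) = _
      by_cases hp : (pvParent x sep).toList = []
      · rw [if_pos hp]
        congr 1
        apply List.map_congr_left
        intro n hn
        have hne : pvParent x sep ≠ n := by
          intro he
          exact pvK_ne_empty hn (he ▸ hp)
        rw [pvVal, pvVal, List.filter_append,
          show List.filter (fun c => decide (pvParent c sep = n)) [x] = [] by simp [hne],
          List.append_nil]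
      · rw [if_neg hp]
        have hpxK : pvParent x sep ∈ pvK g sep := pvClosure hxK hp
        have hgpx : (PySem.Dict.mk ((pvK g sep).map (fun n => (n, pvVal g sep pre n)))).getD
            (pvParent x sep) 0 = pvVal g sep pre (pvParent x sep) :=
          pvGetD_mkmap _ _ _ hKnd hpxK
        have hgx : (PySem.Dict.mk ((pvK g sep).map (fun n => (n, pvVal g sep pre n)))).getD
            x 0 = pvVal g sep pre x :=
          pvGetD_mkmap _ _ _ hKnd hxK
        -- every child of x (in K) lies in pre, so x's value is already final
        have hchild : ∀ c ∈ pvK g sep, pvParent c sep = x → c ∈ pre := by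
          intro c hcK hpc
          have hcltx : PySem.Str.len x < PySem.Str.len c := by
            have := pvParent_len_lt (sep := sep) (pvK_ne_empty hcK)
            rw [hpc] at this
            exact this
          have hcS : c ∈ S := hSperm.mem_iff.mpr hcK
          rw [hps] at hcS
          rcases List.mem_append.mp hcS with hcpre | hcxs
          · exact hcpre
          · exfalso
            rcases List.mem_cons.mp hcxs with hcx | hcsuf
            · subst hcx; omega
            · have hpw := PySem.List.sorted_pairwise_rev (pvK g sep)
                (fun n => PySem.Str.len n)
              rw [← hS, hps] at hpw
              have := (List.pairwise_append.mp hpw).2.1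
              rcases List.pairwise_cons.mp this with ⟨hx1, _⟩
              have := hx1 c hcsuf
              omega
        have hprend : pre.Nodup := by
          have := hps ▸ hSnd
          exact this.of_append_left
        have hpreK : ∀ c ∈ pre, c ∈ pvK g sep := by
          intro c hc
          exact hSperm.subset (by rw [hps]; exact List.mem_append_left _ hc)
        have hfperm : (pre.filter (fun c => decide (pvParent c sep = x))).Perm
            ((pvK g sep).filter (fun c => decide (pvParent c sep = x))) := by
          rw [List.perm_ext_iff_of_nodup (hprend.filter _) (hKnd.filter _)]
          intro c
          simp only [List.mem_filter, decide_eq_true_eq]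
          constructor
          · rintro ⟨hc, hpc⟩
            exact ⟨hpreK c hc, hpc⟩
          · rintro ⟨hc, hpc⟩
            exact ⟨hchild c hc hpc, hpc⟩
        have hvx : pvVal g sep pre x = pvMax (pvOps g sep) x := by
          rw [pvVal, ← List.foldl_map (f := fun c => pvMax (pvOps g sep) c + 1) (g := max),
            (hfperm.map (fun c => pvMax (pvOps g sep) c + 1)).foldl_eq 0,
            List.foldl_map, ← pvRecurrence hxK]
        rw [hgpx, hgx, hvx]
        apply PySem.Dict.ext
        rw [PySem.Dict.items_insert_of_contains _ _ ((pvContains_mkmap _ _ _).mpr hpxK)]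
        show List.map _ (List.map _ _) = _
        rw [List.map_map]
        apply List.map_congr_left
        intro n hn
        by_cases hnp : n = pvParent x sep
        · subst hnp
          simp only [Function.comp_apply, beq_self_eq_true, if_true]
          rw [pvVal, pvVal, List.filter_append,
            show List.filter (fun c => decide (pvParent c sep = pvParent x sep)) [x] = [x] by
              simp,
            List.foldl_append, List.foldl_cons, List.foldl_nil]
        · have hb : (n == pvParent x sep) = false := by simpa using hnp
          simp only [Function.comp_apply, hb, Bool.false_eq_true, if_false]
          rw [pvVal, pvVal, List.filter_append,
            show List.filter (fun c => decide (pvParent c sep = n)) [x] = [] by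
              simp [Ne.symm hnp],
            List.append_nil]
    have hcongr := congrArg
      (fun d => List.foldl
        (fun d node =>
          let parent := pvParent node sep
          if parent.toList = [] then d
          else d.insert parent (max (d.getD parent 0) (d.getD node 0 + 1))) d suf) hstep
    exact hcongr.trans (ih (pre ++ [x]) (by rw [hps, List.append_assoc]; rfl))

theorem pvVal_final {g : List (String × List String)} {sep : String} {n : String}
    (h : n ∈ pvK g sep) :
    pvVal g sep (PySem.List.sorted (pvK g sep) (fun n => PySem.Str.len n) true) n =
      pvMax (pvOps g sep) n := by
  have hperm : ((PySem.List.sorted (pvK g sep) (fun n => PySem.Str.len n) true).filter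
      (fun c => decide (pvParent c sep = n))).Perm
      ((pvK g sep).filter (fun c => decide (pvParent c sep = n))) :=
    (PySem.List.sorted_perm _ _ _).filter _
  rw [pvVal, ← List.foldl_map (f := fun c => pvMax (pvOps g sep) c + 1) (g := max),
    (hperm.map (fun c => pvMax (pvOps g sep) c + 1)).foldl_eq 0,
    List.foldl_map, ← pvRecurrence h]

-- ===== VERDICT (by name: the statement is the Claim_ definition above) =====
theorem pvA_items (g : List (String × List String)) (sep : String) :
    pipeline_levels_py g sep =
      (PySem.Dict.mk ((pvK g sep).map (fun n => (n, pvMax (pvOps g sep) n)))).items := by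
  show ((g.foldl (fun d kv => kv.2.foldl (fun d conn => pvUpdateLevel d conn 0 sep)
      ((fun d conn => pvUpdateLevel d conn 0 sep) d kv.1)) PySem.Dict.empty)).items = _
  rw [pvFoldl_leaves g (fun d conn => pvUpdateLevel d conn 0 sep) PySem.Dict.empty,
    PySem.List.foldl_congr_mem (pvLeaves g) _
      (fun acc l => (PySem.List.enumerate (pvChain sep l) 0).foldl pvBump acc)
      PySem.Dict.empty (fun acc x _ => pvUpdateLevel_eq acc x 0 sep),
    pvFoldl_flatMap (pvLeaves g) (fun l => PySem.List.enumerate (pvChain sep l) 0)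
      pvBump PySem.Dict.empty,
    show (pvLeaves g).flatMap (fun l => PySem.List.enumerate (pvChain sep l) 0) = pvOps g sep
      from rfl,
    pvBumpFold]
  rfl

theorem pvB_items (g : List (String × List String)) (sep : String) :
    pipeline_levels_py_alt g sep =
      (PySem.Dict.mk ((pvK g sep).map (fun n => (n, pvMax (pvOps g sep) n)))).items := by
  have hd0 : (g.foldl (fun d kv => kv.2.foldl (fun d conn => pvRegister d conn sep)
      ((fun d conn => pvRegister d conn sep) d kv.1)) PySem.Dict.empty)
      = PySem.Dict.mk ((pvK g sep).map (fun n => (n, (0 : Int)))) := by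
    rw [pvFoldl_leaves g (fun d conn => pvRegister d conn sep) PySem.Dict.empty,
      PySem.List.foldl_congr_mem (pvLeaves g) _
        (fun acc l => (pvChain sep l).foldl
          (fun (d : PySem.Dict String Int) m => d.setdefault m 0) acc)
        PySem.Dict.empty (fun acc x _ => pvRegister_eq acc x sep),
      pvFoldl_flatMap (pvLeaves g) (pvChain sep)
        (fun (d : PySem.Dict String Int) m => d.setdefault m 0) PySem.Dict.empty,
      pvRegFold, ← pvOps_map_snd]
    rfl
  show ((PySem.List.sorted (g.foldl (fun d kv => kv.2.foldl
        (fun d conn => pvRegister d conn sep) ((fun d conn => pvRegister d conn sep) d kv.1))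
        PySem.Dict.empty).keys (fun n => PySem.Str.len n) true).foldl
      (fun d node =>
        let parent := pvParent node sep
        if parent.toList = [] then d
        else d.insert parent (max (d.getD parent 0) (d.getD node 0 + 1)))
      (g.foldl (fun d kv => kv.2.foldl (fun d conn => pvRegister d conn sep)
        ((fun d conn => pvRegister d conn sep) d kv.1)) PySem.Dict.empty)).items = _
  rw [hd0, PySem.Dict.keys_mk, List.map_map,
    show ((fun (x : String × Int) => x.1) ∘ fun n => (n, (0 : Int))) = id from rfl, List.map_id]
  have hrelax := pvRelax_eq g sep
    (PySem.List.sorted (pvK g sep) (fun n => PySem.Str.len n) true) []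
    (by rw [List.nil_append])
  have hinit : PySem.Dict.mk ((pvK g sep).map (fun n => (n, (0 : Int))))
      = PySem.Dict.mk ((pvK g sep).map (fun n => (n, pvVal g sep [] n))) := rfl
  rw [hinit, hrelax]
  show List.map (fun n =>
      (n, pvVal g sep (PySem.List.sorted (pvK g sep) (fun n => PySem.Str.len n) true) n))
      (pvK g sep) = List.map (fun n => (n, pvMax (pvOps g sep) n)) (pvK g sep)
  apply List.map_congr_left
  intro n hn
  rw [pvVal_final hn]

theorem pipeline_levels_py_spec : Claim_equal_pipeline_levels_py := by
  intro g sep _hdom _hpre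
  show pipeline_levels_py g sep = pipeline_levels_py_alt g sep
  rw [pvA_items, pvB_items]
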